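-- pv_equiv track=rewrite | github.com/sashakolpakov/mte-pareto | pypi_analysis.py | l_omega
-- ===== SOURCE A (Python) =====
-- def l_omega(n: int) -> int:
--     """
--     Elias Ω code length for integer n.
--     ℓΩ(1) = 1.
--     For n > 1: ℓΩ(n) = 1 + sum_{k = n, floor(log2 k), … > 1} floor(log2 k).
--     """
--     length = 1
--     k = n
--     while k > 1:
--         bits = k.bit_length()       # = floor(log2 k) + 1
--         length += bits - 1          # add floor(log2 k)
--         k = bits - 1                # next k
--     return length
-- ===== SOURCE B (Python) =====
-- def l_omega(n: int) -> int:
--     """Elias Omega code length, via the recurrence l(n) = m + l(m), m = floor(log2 n)."""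
--     if n <= 1:
--         return 1
--     m = n.bit_length() - 1
--     return m + l_omega(m)
-- ===== Notes on version B (the rewrite author's own statement) =====
-- stated objective: idiomatic
-- what changed: Replaces the while-loop with mutable accumulator by a direct recursive expression of the Elias Omega recurrence l(n) = floor(log2 n) + l(floor(log2 n)) with base l(n<=1) = 1.
import Mathlib
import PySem

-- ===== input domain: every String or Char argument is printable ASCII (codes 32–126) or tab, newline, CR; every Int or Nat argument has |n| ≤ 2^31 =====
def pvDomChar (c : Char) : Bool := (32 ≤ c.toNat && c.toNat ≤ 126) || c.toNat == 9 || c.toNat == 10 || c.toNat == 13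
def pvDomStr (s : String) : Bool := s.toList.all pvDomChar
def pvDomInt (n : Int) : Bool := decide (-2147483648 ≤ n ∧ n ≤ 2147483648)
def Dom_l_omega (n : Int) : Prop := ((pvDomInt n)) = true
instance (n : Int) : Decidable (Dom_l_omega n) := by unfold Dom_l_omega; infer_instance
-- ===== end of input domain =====

-- B replaces A's while-loop and accumulator by a direct recursion on the Elias Omega recurrence (same cost).

-- int.bit_length() for the nonnegative ints both programs apply it to (they only call it on k > 1)
def pyBitLength (k : Int) : Int := (Nat.size k.toNat : Int)

-- used by both ports' termination: the next loop value floor(log2 k) is smaller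
theorem size_pred_lt (n : Nat) (h : 2 ≤ n) : Nat.size n - 1 < n := by
  have h1 : 1 ≤ Nat.size n := by
    have := Nat.size_pos.mpr (by omega : 0 < n); omega
  have h2 : Nat.size n - 1 < 2 ^ (Nat.size n - 1) := Nat.lt_two_pow_self
  have h3 : 2 ^ (Nat.size n - 1) ≤ n := Nat.lt_size.mp (by omega)
  omega

-- ===== PORT A =====
def l_omega_loop (length k : Int) : Int :=
  if h : k > 1 then
    let bits := pyBitLength k
    l_omega_loop (length + (bits - 1)) (bits - 1)
  else length
termination_by k.toNat
decreasing_by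
  have h2 : 2 ≤ k.toNat := by omega
  have := size_pred_lt k.toNat h2
  simp only [pyBitLength]
  omega

def l_omega (n : Int) : Int := l_omega_loop 1 n

-- ===== PORT B =====
def l_omega_alt (n : Int) : Int :=
  if h : n ≤ 1 then 1
  else
    let m := pyBitLength n - 1
    m + l_omega_alt m
termination_by n.toNat
decreasing_by
  have h2 : 2 ≤ n.toNat := by omega
  have := size_pred_lt n.toNat h2
  simp only [pyBitLength]
  omega

-- ===== PRECONDITION & SPEC =====
def Spec_l_omega (n : Int) (out : Int) : Prop := out = l_omega_alt n
instance (n : Int) (out : Int) : Decidable (Spec_l_omega n out) := by unfold Spec_l_omega; infer_instance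

-- ===== CLAIM (what is proved, stated in full; the proofs are below) =====
def Claim_equal_l_omega : Prop := ∀ (n : Int), Dom_l_omega n → Spec_l_omega n (l_omega n)

-- ===== LEMMAS AND PROOFS =====
theorem loop_eq_alt : ∀ (N : Nat) (k acc : Int), k.toNat ≤ N →
    l_omega_loop acc k = acc - 1 + l_omega_alt k := by
  intro N
  induction N with
  | zero =>
    intro k acc hk
    rw [l_omega_loop, l_omega_alt]
    have h1 : ¬ k > 1 := by omega
    have h2 : k ≤ 1 := by omega
    simp [h1, h2]
  | succ N ih =>
    intro k acc hk
    rw [l_omega_loop, l_omega_alt]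
    by_cases h : k > 1
    · have h2 : 2 ≤ k.toNat := by omega
      have hsz := size_pred_lt k.toNat h2
      have hsz1 : 1 ≤ Nat.size k.toNat := by
        have := Nat.size_pos.mpr (by omega : 0 < k.toNat); omega
      have hlt : (pyBitLength k - 1).toNat ≤ N := by
        simp only [pyBitLength]; omega
      have hne : ¬ k ≤ 1 := by omega
      simp only [dif_pos h, dif_neg hne]
      rw [ih _ _ hlt]
      ring
    · have hle : k ≤ 1 := by omega
      simp [h, hle]

-- ===== VERDICT (by name: the statement is the Claim_ definition above) =====
theorem l_omega_spec : Claim_equal_l_omega := by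
  intro n _
  unfold Spec_l_omega l_omega
  rw [loop_eq_alt n.toNat n 1 le_rfl]
  ring
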